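-- pv_equiv track=rewrite | github.com/han-j-y/0824_nlp_midterm | q09_200818_word2vec/dataset.py | skipgram
-- ===== SOURCE A (Python) =====
-- from typing import List, Dict, Tuple
--
-- def skipgram(
--         sentence: List[str],
--         window_size: int,
--         center_word_loc: int
-- ) -> Tuple[str, List[str]]:
--     """ Function to generate a (center_word, outside_words) pair for skipgram
--
--     Implement the function that generate a (center_word, outside_words) pair from the given sentence and the location of center word.
--
--     Argument:
--     sentence -- A sentence where the center word and the outside words come from
--     window_size -- Integer, context window size
--     center_word_loc -- The location of the center word within the sentence
--
--     Return:
--     center_word -- String, a center word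
--     outside_words -- List of string, words within the window centered on the center word.
--                      outside_words dose not include center_word.
--                      The number of outside words could be less than 2 * window_size.
--     """
--     # YOUR CODE HERE (~3 lines)
--     outside_words = []
--     for w in range(-window_size, window_size + 1):
--         context_word_pos = center_word_loc + w
--         if context_word_pos < 0 or context_word_pos >= len(sentence) or center_word_loc == context_word_pos:
--             continue
--         outside_words.append(sentence[context_word_pos])
--
--     # END YOUR CODE
--     return sentence[center_word_loc], outside_words
-- ===== SOURCE B (Python) =====
-- from typing import List, Tuple
--
-- def skipgram(
--         sentence: List[str],
--         window_size: int,
--         center_word_loc: int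
-- ) -> Tuple[str, List[str]]:
--     """Skipgram pair via slicing: the context is the two slices flanking the center."""
--     ws = max(window_size, 0)
--     left = sentence[max(0, center_word_loc - ws):center_word_loc]
--     right = sentence[center_word_loc + 1:center_word_loc + 1 + ws]
--     return sentence[center_word_loc], left + right
-- ===== Notes on version B (the rewrite author's own statement) =====
-- stated objective: simpler
-- what changed: Replaces A's per-offset loop over range(-window_size, window_size+1) with two clamped list slices (left and right of the center) concatenated, removing the per-position bounds and center-equality checks.
-- outside the precondition, e.g. on skipgram(['a', 'b', 'c'], 1, -1): A returns ('c', ['a']), B returns ('c', ['a', 'b', 'a']); on skipgram(['a', 'b'], 1, 5): A raises IndexError, B raises IndexError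
import Mathlib
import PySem

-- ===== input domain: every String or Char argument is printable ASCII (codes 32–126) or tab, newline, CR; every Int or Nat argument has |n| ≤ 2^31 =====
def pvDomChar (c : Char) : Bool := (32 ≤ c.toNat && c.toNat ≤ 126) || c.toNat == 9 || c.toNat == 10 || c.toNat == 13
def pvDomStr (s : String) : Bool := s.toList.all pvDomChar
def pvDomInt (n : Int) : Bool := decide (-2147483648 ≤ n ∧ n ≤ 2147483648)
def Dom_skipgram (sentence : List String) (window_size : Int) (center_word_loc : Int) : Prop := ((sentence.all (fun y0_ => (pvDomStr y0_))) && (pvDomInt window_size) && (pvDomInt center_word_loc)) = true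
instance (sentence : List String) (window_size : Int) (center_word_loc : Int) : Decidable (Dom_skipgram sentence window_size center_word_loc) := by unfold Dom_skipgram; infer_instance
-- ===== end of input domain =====

-- B replaces A's per-offset loop with two clamped slices flanking the center word (simpler; return-value equivalence on 0 ≤ center_word_loc < len(sentence)).

-- ===== PORT A =====
def skipgram (sentence : List String) (window_size : Int) (center_word_loc : Int) : String × List String :=
  (PySem.List.pyGetD sentence center_word_loc "",
   (PySem.List.pyRange (-window_size) (window_size + 1)).foldl
      (fun acc w =>
        if center_word_loc + w < 0 ∨ PySem.List.len sentence ≤ center_word_loc + w ∨ center_word_loc = center_word_loc + w then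
          acc
        else
          acc ++ [PySem.List.pyGetD sentence (center_word_loc + w) ""]) [])

-- ===== PORT B =====
def skipgram_alt (sentence : List String) (window_size : Int) (center_word_loc : Int) : String × List String :=
  (PySem.List.pyGetD sentence center_word_loc "",
   PySem.List.slice sentence (some (max 0 (center_word_loc - max window_size 0))) (some center_word_loc) ++
   PySem.List.slice sentence (some (center_word_loc + 1)) (some (center_word_loc + 1 + max window_size 0)))

-- ===== PRECONDITION & SPEC =====
-- Pre_ excludes center locations outside [0, len(sentence)): at or past either end A raises IndexError, and
-- negative in-range locations select the center by Python's negative-index wraparound, a corner no caller of a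
-- skipgram sampler would specify, where A's clipped-window value and B's slice value are both accidental.
def Pre_skipgram (sentence : List String) (window_size : Int) (center_word_loc : Int) : Prop :=
  0 ≤ center_word_loc ∧ center_word_loc < sentence.length
instance (sentence : List String) (window_size : Int) (center_word_loc : Int) : Decidable (Pre_skipgram sentence window_size center_word_loc) := by unfold Pre_skipgram; infer_instance

def pvWitness_skipgram : List String × Int × Int := (["the", "quick", "brown", "fox"], 2, 1)

def Spec_skipgram (sentence : List String) (window_size : Int) (center_word_loc : Int) (out : String × List String) : Prop := out = skipgram_alt sentence window_size center_word_loc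
instance (sentence : List String) (window_size : Int) (center_word_loc : Int) (out : String × List String) : Decidable (Spec_skipgram sentence window_size center_word_loc out) := by unfold Spec_skipgram; infer_instance

-- ===== CLAIM (what is proved, stated in full; the proofs are below) =====
def Claim_equal_skipgram : Prop := ∀ (sentence : List String) (window_size : Int) (center_word_loc : Int), Dom_skipgram sentence window_size center_word_loc → Pre_skipgram sentence window_size center_word_loc → Spec_skipgram sentence window_size center_word_loc (skipgram sentence window_size center_word_loc)

-- ===== LEMMAS AND PROOFS =====

-- a skip-style loop body is the mirrored append-if loop body
theorem foldl_skip_if {α β : Type} (p : α → Prop) [DecidablePred p] (f : α → β) (l : List α) (acc : List β) :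
    l.foldl (fun acc x => if p x then acc else acc ++ [f x]) acc
      = acc ++ (l.filter (fun x => decide (¬ p x))).map f := by
  have hfun : (fun (acc : List β) (x : α) => if p x then acc else acc ++ [f x])
      = (fun (acc : List β) (x : α) => if (fun y => decide (¬ p y)) x = true then acc ++ [f x] else acc) := by
    funext a x
    by_cases h : p x <;> simp [h]
  rw [hfun, PySem.List.foldl_append_if]

-- filtering a consecutive range by a bounds predicate clamps the range
theorem filter_pyRange_bounds (lo hi : Int) : ∀ (n : Nat) (a b : Int), (b - a).toNat = n →
    (PySem.List.pyRange a b).filter (fun w => decide (lo ≤ w ∧ w < hi)) =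
      PySem.List.pyRange (max a lo) (min b hi) := by
  intro n
  induction n with
  | zero =>
    intro a b h
    have hba : b ≤ a := by omega
    rw [PySem.List.pyRange_one_eq_nil hba,
        PySem.List.pyRange_one_eq_nil (show min b hi ≤ max a lo by omega)]
    rfl
  | succ k ih =>
    intro a b h
    have hab : a < b := by omega
    rw [PySem.List.pyRange_one_cons hab]
    by_cases hP : lo ≤ a ∧ a < hi
    · rw [List.filter_cons_of_pos (by simpa using hP), ih (a + 1) b (by omega)]
      have h1 : max a lo = a := by omega
      have h2 : max (a + 1) lo = a + 1 := by omega
      rw [h1, h2, ← PySem.List.pyRange_one_cons (show a < min b hi by omega)]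
    · rw [List.filter_cons_of_neg (by simpa using hP), ih (a + 1) b (by omega)]
      by_cases hlo : lo ≤ a
      · have hhi : hi ≤ a := by omega
        rw [PySem.List.pyRange_one_eq_nil (show min b hi ≤ max (a + 1) lo by omega),
            PySem.List.pyRange_one_eq_nil (show min b hi ≤ max a lo by omega)]
      · have h2 : max (a + 1) lo = max a lo := by omega
        rw [h2]

-- shifting the index variable of a mapped range of lookups
theorem map_get_shift (xs : List String) (c a b : Int) :
    (PySem.List.pyRange a b).map (fun w => PySem.List.pyGetD xs (c + w) "") =
      (PySem.List.pyRange (c + a) (c + b)).map (fun p => PySem.List.pyGetD xs p "") := by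
  simp only [PySem.List.pyRange_one, List.map_map]
  have hd : c + b - (c + a) = b - a := by ring
  rw [hd]
  apply List.map_congr_left
  intro k _
  simp only [Function.comp]
  congr 1
  ring

-- a slice with in-range bounds is the list of indexed elements
theorem slice_eq_map_pyGetD (xs : List String) (a b : Int) (h0 : 0 ≤ a) (hab : a ≤ b)
    (hb : b ≤ (xs.length : Int)) :
    PySem.List.slice xs (some a) (some b) =
      (PySem.List.pyRange a b).map (fun p => PySem.List.pyGetD xs p "") := by
  have hb0 : (0 : Int) ≤ b := by omega
  rw [PySem.List.slice_toNat xs (a := a) (b := b) h0 hb0]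
  have hsplit : PySem.List.pyRange a (PySem.List.len xs) =
      PySem.List.pyRange a b ++ PySem.List.pyRange b (PySem.List.len xs) := by
    apply PySem.List.pyRange_one_append a b _ hab
    simpa [PySem.List.len_eq] using hb
  have hfull := PySem.List.map_pyGetD_pyRange xs "" h0
  rw [hsplit, List.map_append] at hfull
  have hlen : ((PySem.List.pyRange a b).map (fun p => PySem.List.pyGetD xs p "")).length
      = b.toNat - a.toNat := by
    rw [List.length_map, PySem.List.length_pyRange_one]; omega
  rw [← hfull, List.take_left' hlen]

-- a slice may clamp its stop bound to the length
theorem slice_clamp_stop (xs : List String) (a b : Int) (h0 : 0 ≤ a) (hab : a ≤ b) :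
    PySem.List.slice xs (some a) (some b) =
      PySem.List.slice xs (some a) (some (min b (xs.length : Int))) := by
  have hb0 : (0 : Int) ≤ b := by omega
  have hm0 : (0 : Int) ≤ min b (xs.length : Int) := by omega
  rw [PySem.List.slice_toNat xs (a := a) (b := b) h0 hb0,
      PySem.List.slice_toNat xs (a := a) (b := min b (xs.length : Int)) h0 hm0]
  rw [List.take_eq_take_iff, List.length_drop]
  omega

-- ===== VERDICT (by name: the statement is the Claim_ definition above) =====
theorem skipgram_spec : Claim_equal_skipgram := by
  intro sentence window_size center_word_loc _hdom hpre
  obtain ⟨hc0, hcn⟩ := hpre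
  have key : (PySem.List.pyRange (-window_size) (window_size + 1)).foldl
      (fun acc w =>
        if center_word_loc + w < 0 ∨ PySem.List.len sentence ≤ center_word_loc + w ∨ center_word_loc = center_word_loc + w then
          acc
        else
          acc ++ [PySem.List.pyGetD sentence (center_word_loc + w) ""]) []
    = PySem.List.slice sentence (some (max 0 (center_word_loc - max window_size 0))) (some center_word_loc) ++
      PySem.List.slice sentence (some (center_word_loc + 1)) (some (center_word_loc + 1 + max window_size 0)) := by
    rw [foldl_skip_if (fun w => center_word_loc + w < 0 ∨ PySem.List.len sentence ≤ center_word_loc + w ∨ center_word_loc = center_word_loc + w)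
        (fun w => PySem.List.pyGetD sentence (center_word_loc + w) "") _ [], List.nil_append]
    by_cases hw : 0 ≤ window_size
    · have hmax : max window_size 0 = window_size := by omega
      rw [hmax]
      rw [PySem.List.pyRange_one_append (-window_size) 0 (window_size + 1) (by omega) (by omega),
          PySem.List.pyRange_one_append 0 1 (window_size + 1) (by omega) (by omega)]
      have h01 : PySem.List.pyRange 0 1 = [(0 : Int)] := by decide
      rw [h01, List.filter_append, List.filter_append, List.map_append, List.map_append]
      have hmid : List.filter (fun w => decide (¬ (center_word_loc + w < 0 ∨ PySem.List.len sentence ≤ center_word_loc + w ∨ center_word_loc = center_word_loc + w))) [(0 : Int)] = [] := by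
        simp
      rw [hmid, List.map_nil, List.nil_append]
      congr 1
      · -- left half of the window
        have hcong : ∀ w ∈ PySem.List.pyRange (-window_size) 0,
            (decide (¬ (center_word_loc + w < 0 ∨ PySem.List.len sentence ≤ center_word_loc + w ∨ center_word_loc = center_word_loc + w)))
              = (decide (-center_word_loc ≤ w ∧ w < 0)) := by
          intro w hwm
          have hmem := (PySem.List.mem_pyRange_one).mp hwm
          simp only [PySem.List.len_eq, decide_eq_decide]
          omega
        rw [List.filter_congr hcong,
            filter_pyRange_bounds (-center_word_loc) 0 ((0 - (-window_size)).toNat) (-window_size) 0 rfl]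
        have hm : min (0 : Int) 0 = 0 := rfl
        rw [hm, map_get_shift sentence center_word_loc (max (-window_size) (-center_word_loc)) 0]
        have e1 : center_word_loc + max (-window_size) (-center_word_loc) = max 0 (center_word_loc - window_size) := by omega
        have e2 : center_word_loc + 0 = center_word_loc := by ring
        rw [e1, e2,
            slice_eq_map_pyGetD sentence (max 0 (center_word_loc - window_size)) center_word_loc (by omega) (by omega) (by omega)]
      · -- right half of the window
        have hcong : ∀ w ∈ PySem.List.pyRange 1 (window_size + 1),
            (decide (¬ (center_word_loc + w < 0 ∨ PySem.List.len sentence ≤ center_word_loc + w ∨ center_word_loc = center_word_loc + w)))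
              = (decide (1 ≤ w ∧ w < (sentence.length : Int) - center_word_loc)) := by
          intro w hwm
          have hmem := (PySem.List.mem_pyRange_one).mp hwm
          simp only [PySem.List.len_eq, decide_eq_decide]
          omega
        rw [List.filter_congr hcong,
            filter_pyRange_bounds 1 ((sentence.length : Int) - center_word_loc) ((window_size + 1 - 1).toNat) 1 (window_size + 1) rfl]
        have hm : max (1 : Int) 1 = 1 := rfl
        rw [hm, map_get_shift sentence center_word_loc 1 (min (window_size + 1) ((sentence.length : Int) - center_word_loc))]
        rw [slice_clamp_stop sentence (center_word_loc + 1) (center_word_loc + 1 + window_size) (by omega) (by omega)]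
        rw [slice_eq_map_pyGetD sentence (center_word_loc + 1)
            (min (center_word_loc + 1 + window_size) (sentence.length : Int)) (by omega) (by omega) (by omega)]
        have e1 : center_word_loc + min (window_size + 1) ((sentence.length : Int) - center_word_loc)
            = min (center_word_loc + 1 + window_size) (sentence.length : Int) := by omega
        rw [e1]
    · -- negative window: empty range, empty slices
      rw [PySem.List.pyRange_one_eq_nil (show window_size + 1 ≤ -window_size by omega)]
      simp only [List.filter_nil, List.map_nil]
      have hmax : max window_size 0 = 0 := by omega
      rw [hmax]
      have e1 : max 0 (center_word_loc - 0) = center_word_loc := by omega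
      rw [e1]
      have h1 : PySem.List.slice sentence (some center_word_loc) (some center_word_loc) = [] := by
        rw [PySem.List.slice_toNat sentence (a := center_word_loc) (b := center_word_loc) hc0 hc0]
        simp
      have e3 : center_word_loc + 1 + 0 = center_word_loc + 1 := by ring
      have h2 : PySem.List.slice sentence (some (center_word_loc + 1)) (some (center_word_loc + 1)) = [] := by
        rw [PySem.List.slice_toNat sentence (a := center_word_loc + 1) (b := center_word_loc + 1) (by omega) (by omega)]
        simp
      rw [e3, h1, h2]
      rfl
  unfold Spec_skipgram skipgram skipgram_alt
  exact congrArg (Prod.mk (PySem.List.pyGetD sentence center_word_loc "")) key
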